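-- pv_equiv track=rewrite | github.com/Peiprjs/Data-analysis2 | notebooks/functions.py | get_taxonomic_level
-- ===== SOURCE A (Python) =====
-- def get_taxonomic_level(feature_name):
--     """
--     Extract taxonomic level from MetaPhlAn feature name.
--
--     Taxonomic levels:
--     - k__ = Kingdom
--     - p__ = Phylum
--     - c__ = Class
--     - o__ = Order
--     - f__ = Family
--     - g__ = Genus
--     - s__ = Species
--     - t__ = Terminal (SGB - Species-Level Genome Bin)
--
--     Returns the deepest taxonomic level present in the feature name.
--     """
--     level_order = ['k__', 'p__', 'c__', 'o__', 'f__', 'g__', 's__', 't__']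
--     level_names = ['Kingdom', 'Phylum', 'Class', 'Order', 'Family', 'Genus', 'Species', 'SGB']
--
--     deepest_level = None
--     deepest_idx = -1
--
--     for idx, level in enumerate(level_order):
--         if level in str(feature_name):
--             if idx > deepest_idx:
--                 deepest_level = level_names[idx]
--                 deepest_idx = idx
--
--     return deepest_level if deepest_level else 'Unknown'
-- ===== SOURCE B (Python) =====
-- def get_taxonomic_level(feature_name):
--     s = str(feature_name)
--     found = {s[i] for i in range(len(s) - 2) if s[i+1] == '_' and s[i+2] == '_'}
--     for letter, name in (('t', 'SGB'), ('s', 'Species'), ('g', 'Genus'), ('f', 'Family'),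
--                          ('o', 'Order'), ('c', 'Class'), ('p', 'Phylum'), ('k', 'Kingdom')):
--         if letter in found:
--             return name
--     return 'Unknown'
-- ===== Notes on version B (the rewrite author's own statement) =====
-- stated objective: alternative
-- what changed: Replaces the per-level substring search (8 scans over the string, tracking the maximal matching index) with one sliding-window pass over the string that collects the set of letters preceding a double underscore, followed by a table lookup from the deepest letter down.
import Mathlib
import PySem

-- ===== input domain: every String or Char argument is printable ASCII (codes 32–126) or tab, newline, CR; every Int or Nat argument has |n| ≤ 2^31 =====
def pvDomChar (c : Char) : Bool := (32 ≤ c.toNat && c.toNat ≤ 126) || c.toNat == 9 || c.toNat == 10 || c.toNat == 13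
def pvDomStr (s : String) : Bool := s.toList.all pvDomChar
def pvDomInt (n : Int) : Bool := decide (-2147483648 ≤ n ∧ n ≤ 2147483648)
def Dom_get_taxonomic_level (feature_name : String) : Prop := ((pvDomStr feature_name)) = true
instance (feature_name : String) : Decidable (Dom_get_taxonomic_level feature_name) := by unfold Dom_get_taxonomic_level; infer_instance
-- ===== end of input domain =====

-- B replaces A's eight per-level substring searches with one sliding-window pass over the
-- string that collects the set of letters preceding '__', then a table lookup; objective: alternative.

-- ===== PORT A =====
-- forward loop, state (deepest_level : Option String, deepest_idx : Int);
-- level_names[idx] is always in range (idx enumerates level_order, same length), so .getD "" never fires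
def get_taxonomic_level (feature_name : String) : String :=
  let level_order : List String := ["k__", "p__", "c__", "o__", "f__", "g__", "s__", "t__"]
  let level_names : List String := ["Kingdom", "Phylum", "Class", "Order", "Family", "Genus", "Species", "SGB"]
  let st := (PySem.List.enumerate level_order).foldl
    (fun (st : Option String × Int) p =>
      if PySem.Str.isIn p.2 feature_name then
        if p.1 > st.2 then ((PySem.List.pyGet? level_names p.1).getD "", p.1) else st
      else st)
    (none, -1)
  -- 'deepest_level if deepest_level else "Unknown"': None and "" are falsy
  match st.1 with
  | some t => if t = "" then "Unknown" else t
  | none => "Unknown"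

-- ===== PORT B =====
-- the set comprehension {s[i] for i in range(len(s)-2) if s[i+1]=='_' and s[i+2]=='_'}:
-- a sliding 3-char window over the characters, in the same left-to-right order as the
-- range(len(s)-2) indexing (exact: window (a,b,c) at position i is (s[i],s[i+1],s[i+2]))
def gtlWins : List Char → PySem.Set Char → PySem.Set Char
  | a :: b :: c :: r, s => gtlWins (b :: c :: r) (if b = '_' ∧ c = '_' then PySem.Set.add s a else s)
  | _, s => s

-- the lookup loop over ((letter, name), …), deepest first
def gtlPick (found : PySem.Set Char) : List (Char × String) → String
  | [] => "Unknown"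
  | (letter, name) :: rest => if PySem.Set.contains found letter then name else gtlPick found rest

def get_taxonomic_level_alt (feature_name : String) : String :=
  let found := gtlWins feature_name.toList PySem.Set.empty
  gtlPick found [('t', "SGB"), ('s', "Species"), ('g', "Genus"), ('f', "Family"),
                 ('o', "Order"), ('c', "Class"), ('p', "Phylum"), ('k', "Kingdom")]

-- ===== PRECONDITION & SPEC =====
def Spec_get_taxonomic_level (feature_name : String) (out : String) : Prop := out = get_taxonomic_level_alt feature_name
instance (feature_name : String) (out : String) : Decidable (Spec_get_taxonomic_level feature_name out) := by unfold Spec_get_taxonomic_level; infer_instance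

-- ===== CLAIM (what is proved, stated in full; the proofs are below) =====
def Claim_equal_get_taxonomic_level : Prop := ∀ (feature_name : String), Dom_get_taxonomic_level feature_name → Spec_get_taxonomic_level feature_name (get_taxonomic_level feature_name)

-- ===== LEMMAS AND PROOFS =====

-- A's level_names list, and A's loop body as a named function (definitionally equal to the inline lambda)
def pvLN : List String := ["Kingdom", "Phylum", "Class", "Order", "Family", "Genus", "Species", "SGB"]

def pvFA (name : String) (st : Option String × Int) (p : Int × String) : Option String × Int :=
  if PySem.Str.isIn p.2 name then
    if p.1 > st.2 then (some ((PySem.List.pyGet? pvLN p.1).getD ""), p.1) else st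
  else st

theorem pvA_as_fold (s : String) : get_taxonomic_level s =
    (match ((PySem.List.enumerate ["k__", "p__", "c__", "o__", "f__", "g__", "s__", "t__"]).foldl (pvFA s) (none, -1)).1 with
     | some t => if t = "" then "Unknown" else t
     | none => "Unknown") := rfl

theorem pv_fold_snd_le (name : String) (b : Int) (L : List (Int × String)) :
    ∀ (st : Option String × Int), st.2 ≤ b → (∀ q ∈ L, q.1 ≤ b) →
    (L.foldl (pvFA name) st).2 ≤ b := by
  induction L with
  | nil => intro st h _; simpa using h
  | cons p L ih =>
    intro st h hq
    simp only [List.foldl_cons]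
    apply ih
    · have hp : p.1 ≤ b := hq p (List.mem_cons_self)
      unfold pvFA; split_ifs <;> simpa
    · intro q hqm; exact hq q (List.mem_cons_of_mem _ hqm)

-- peeling off the last (deepest) enumerated level: its index beats whatever the earlier loop kept
theorem pv_peel (name : String) (b : Int) (M : List (Int × String)) (p : Int × String)
    (st : Option String × Int) (hst : st.2 ≤ b) (hM : ∀ q ∈ M, q.1 ≤ b) (hp : b < p.1) :
    (M ++ [p]).foldl (pvFA name) st =
      if PySem.Str.isIn p.2 name then (some ((PySem.List.pyGet? pvLN p.1).getD ""), p.1)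
      else M.foldl (pvFA name) st := by
  rw [List.foldl_append]
  have hle := pv_fold_snd_le name b M st hst hM
  simp only [List.foldl_cons, List.foldl_nil]
  unfold pvFA
  split_ifs with h1 h2
  · rfl
  · exact (h2 (lt_of_le_of_lt hle hp)).elim
  · rfl

theorem pvA_closed (s : String) : get_taxonomic_level s =
    (if PySem.Str.isIn "t__" s then "SGB" else
     if PySem.Str.isIn "s__" s then "Species" else
     if PySem.Str.isIn "g__" s then "Genus" else
     if PySem.Str.isIn "f__" s then "Family" else
     if PySem.Str.isIn "o__" s then "Order" else
     if PySem.Str.isIn "c__" s then "Class" else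
     if PySem.Str.isIn "p__" s then "Phylum" else
     if PySem.Str.isIn "k__" s then "Kingdom" else "Unknown") := by
  rw [pvA_as_fold]
  rw [show PySem.List.enumerate ["k__", "p__", "c__", "o__", "f__", "g__", "s__", "t__"]
      = [((0:Int),"k__"),(1,"p__"),(2,"c__"),(3,"o__"),(4,"f__"),(5,"g__"),(6,"s__"),(7,"t__")] from rfl]
  rw [show ([((0:Int),"k__"),(1,"p__"),(2,"c__"),(3,"o__"),(4,"f__"),(5,"g__"),(6,"s__"),(7,"t__")])
      = [((0:Int),"k__"),(1,"p__"),(2,"c__"),(3,"o__"),(4,"f__"),(5,"g__"),(6,"s__")] ++ [(7,"t__")] from rfl,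
     pv_peel s 6 _ _ _ (by norm_num) (by decide) (by norm_num)]
  rw [show ([((0:Int),"k__"),(1,"p__"),(2,"c__"),(3,"o__"),(4,"f__"),(5,"g__"),(6,"s__")])
      = [((0:Int),"k__"),(1,"p__"),(2,"c__"),(3,"o__"),(4,"f__"),(5,"g__")] ++ [(6,"s__")] from rfl,
     pv_peel s 5 _ _ _ (by norm_num) (by decide) (by norm_num)]
  rw [show ([((0:Int),"k__"),(1,"p__"),(2,"c__"),(3,"o__"),(4,"f__"),(5,"g__")])
      = [((0:Int),"k__"),(1,"p__"),(2,"c__"),(3,"o__"),(4,"f__")] ++ [(5,"g__")] from rfl,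
     pv_peel s 4 _ _ _ (by norm_num) (by decide) (by norm_num)]
  rw [show ([((0:Int),"k__"),(1,"p__"),(2,"c__"),(3,"o__"),(4,"f__")])
      = [((0:Int),"k__"),(1,"p__"),(2,"c__"),(3,"o__")] ++ [(4,"f__")] from rfl,
     pv_peel s 3 _ _ _ (by norm_num) (by decide) (by norm_num)]
  rw [show ([((0:Int),"k__"),(1,"p__"),(2,"c__"),(3,"o__")])
      = [((0:Int),"k__"),(1,"p__"),(2,"c__")] ++ [(3,"o__")] from rfl,
     pv_peel s 2 _ _ _ (by norm_num) (by decide) (by norm_num)]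
  rw [show ([((0:Int),"k__"),(1,"p__"),(2,"c__")])
      = [((0:Int),"k__"),(1,"p__")] ++ [(2,"c__")] from rfl,
     pv_peel s 1 _ _ _ (by norm_num) (by decide) (by norm_num)]
  rw [show ([((0:Int),"k__"),(1,"p__")])
      = [((0:Int),"k__")] ++ [(1,"p__")] from rfl,
     pv_peel s 0 _ _ _ (by norm_num) (by decide) (by norm_num)]
  rw [show ([((0:Int),"k__")]) = ([] : List (Int × String)) ++ [((0:Int),"k__")] from rfl,
     pv_peel s (-1) _ _ _ (by norm_num) (by simp) (by norm_num)]
  split_ifs <;> rfl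

-- membership in the collected window set = "the three-char pattern [x,'_','_'] occurs"
theorem pv_mem_gtlWins (x : Char) (l : List Char) (s : PySem.Set Char) :
    x ∈ gtlWins l s ↔ x ∈ s ∨ [x, '_', '_'] <:+: l := by
  induction l, s using gtlWins.induct with
  | case1 a b c r s ih =>
    rw [show gtlWins (a :: b :: c :: r) s
        = gtlWins (b :: c :: r) (if b = '_' ∧ c = '_' then PySem.Set.add s a else s) from rfl]
    rw [ih]
    constructor
    · rintro (hm | hinf)
      · by_cases hw : b = '_' ∧ c = '_'
        · rw [if_pos hw] at hm
          rcases (PySem.Set.mem_add _ _ _).1 hm with hm | rfl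
          · exact Or.inl hm
          · exact Or.inr ⟨[], r, by simp [hw.1, hw.2]⟩
        · rw [if_neg hw] at hm; exact Or.inl hm
      · exact Or.inr (hinf.trans (List.suffix_cons a (b :: c :: r)).isInfix)
    · rintro (hm | hinf)
      · left; split_ifs with hw
        · exact (PySem.Set.mem_add _ _ _).2 (Or.inl hm)
        · exact hm
      · rcases (List.infix_cons_iff).1 hinf with hpre | hinf'
        · rcases hpre with ⟨t, ht⟩
          have h1 : a = x ∧ b = '_' ∧ c = '_' := by
            simpa using congrArg (fun l => (l.take 3)) ht.symm
          left
          rw [if_pos ⟨h1.2.1, h1.2.2⟩]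
          exact (PySem.Set.mem_add _ _ _).2 (Or.inr h1.1.symm)
        · exact Or.inr hinf'
  | case2 t st hne =>
    have hlen : ¬ ([x, '_', '_'] <:+: t) := by
      intro h
      have := h.length_le
      match t, hne with
      | [], _ => simp at this
      | [_], _ => simp at this
      | [_, _], _ => simp at this
      | _ :: _ :: _ :: _, hne => exact hne _ _ _ _ rfl
    rw [show gtlWins t st = st from by
      match t, hne with
      | [], _ => rfl
      | [_], _ => rfl
      | [_, _], _ => rfl
      | _ :: _ :: _ :: _, hne => exact absurd rfl (hne _ _ _ _)]
    simp [hlen]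

theorem pv_contains_isIn (x : Char) (p s : String) (hp : p.toList = [x, '_', '_']) :
    PySem.Set.contains (gtlWins s.toList PySem.Set.empty) x = PySem.Str.isIn p s := by
  rw [Bool.eq_iff_iff, PySem.Set.contains_iff, PySem.Str.isIn_iff_infix, hp, pv_mem_gtlWins]
  simp [PySem.Set.empty]

theorem pvB_closed (s : String) : get_taxonomic_level_alt s =
    (if PySem.Str.isIn "t__" s then "SGB" else
     if PySem.Str.isIn "s__" s then "Species" else
     if PySem.Str.isIn "g__" s then "Genus" else
     if PySem.Str.isIn "f__" s then "Family" else
     if PySem.Str.isIn "o__" s then "Order" else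
     if PySem.Str.isIn "c__" s then "Class" else
     if PySem.Str.isIn "p__" s then "Phylum" else
     if PySem.Str.isIn "k__" s then "Kingdom" else "Unknown") := by
  show gtlPick (gtlWins s.toList PySem.Set.empty) _ = _
  simp only [gtlPick,
    pv_contains_isIn 't' "t__" s (by decide), pv_contains_isIn 's' "s__" s (by decide),
    pv_contains_isIn 'g' "g__" s (by decide), pv_contains_isIn 'f' "f__" s (by decide),
    pv_contains_isIn 'o' "o__" s (by decide), pv_contains_isIn 'c' "c__" s (by decide),
    pv_contains_isIn 'p' "p__" s (by decide), pv_contains_isIn 'k' "k__" s (by decide)]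

-- ===== VERDICT (by name: the statement is the Claim_ definition above) =====
theorem get_taxonomic_level_spec : Claim_equal_get_taxonomic_level := by
  intro s _
  unfold Spec_get_taxonomic_level
  rw [pvA_closed, pvB_closed]
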